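-- pv_equiv track=rewrite | github.com/swatiagrawal264/AI-Research-Agent | test.py | funcChessBoard
-- ===== SOURCE A (Python) =====
-- def funcChessBoard(inputNum):
-- 	result = []
-- 	for i in range(inputNum):
-- 		row = []
-- 		for j in range(inputNum):
-- 			if (i + j) % 2 == 0:
-- 				row.append("W")
-- 			else:
-- 				row.append("S")
-- 		result.append(" ".join(row))
-- 	return "\n".join(result)
-- ===== SOURCE B (Python) =====
-- def funcChessBoard(inputNum):
--     even_row = " ".join("W" if j % 2 == 0 else "S" for j in range(inputNum))
--     odd_row = " ".join("S" if j % 2 == 0 else "W" for j in range(inputNum))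
--     return "\n".join(even_row if i % 2 == 0 else odd_row for i in range(inputNum))
-- ===== Notes on version B (the rewrite author's own statement) =====
-- stated objective: simpler
-- what changed: B precomputes the two distinct parity rows once and selects one per row index, replacing A's per-cell nested loop with per-row string selection.
import Mathlib
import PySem

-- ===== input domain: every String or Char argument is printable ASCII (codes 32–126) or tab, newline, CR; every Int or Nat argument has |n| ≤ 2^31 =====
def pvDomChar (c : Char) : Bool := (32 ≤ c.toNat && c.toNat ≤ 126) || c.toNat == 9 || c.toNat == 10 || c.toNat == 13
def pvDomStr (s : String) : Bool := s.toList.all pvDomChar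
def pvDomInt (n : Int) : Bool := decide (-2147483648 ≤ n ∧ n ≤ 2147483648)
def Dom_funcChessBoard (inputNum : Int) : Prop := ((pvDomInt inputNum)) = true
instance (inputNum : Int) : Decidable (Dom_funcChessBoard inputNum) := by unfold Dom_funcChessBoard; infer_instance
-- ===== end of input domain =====

-- B precomputes the two distinct parity rows once and selects one per row index,
-- replacing A's per-cell nested loop assembly; return values are proved equal for all inputs.

-- ===== PORT A =====
def funcChessBoard (inputNum : Int) : String :=
  let result := (PySem.List.pyRange 0 inputNum 1).foldl (fun result i =>
    let row := (PySem.List.pyRange 0 inputNum 1).foldl (fun row j =>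
      if PySem.Int.mod (i + j) 2 = 0 then row ++ ["W"] else row ++ ["S"]) []
    result ++ [PySem.Str.join " " row]) []
  PySem.Str.join "\n" result

-- ===== PORT B =====
def funcChessBoard_alt (inputNum : Int) : String :=
  let evenRow := PySem.Str.join " "
    ((PySem.List.pyRange 0 inputNum 1).map (fun j => if PySem.Int.mod j 2 = 0 then "W" else "S"))
  let oddRow := PySem.Str.join " "
    ((PySem.List.pyRange 0 inputNum 1).map (fun j => if PySem.Int.mod j 2 = 0 then "S" else "W"))
  PySem.Str.join "\n"
    ((PySem.List.pyRange 0 inputNum 1).map (fun i => if PySem.Int.mod i 2 = 0 then evenRow else oddRow))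

-- ===== PRECONDITION & SPEC =====
def Spec_funcChessBoard (inputNum : Int) (out : String) : Prop := out = funcChessBoard_alt inputNum
instance (inputNum : Int) (out : String) : Decidable (Spec_funcChessBoard inputNum out) := by unfold Spec_funcChessBoard; infer_instance

-- ===== CLAIM (what is proved, stated in full; the proofs are below) =====
def Claim_equal_funcChessBoard : Prop := ∀ (inputNum : Int), Dom_funcChessBoard inputNum → Spec_funcChessBoard inputNum (funcChessBoard inputNum)

-- ===== LEMMAS AND PROOFS =====

-- A's inner loop for row i produces exactly the parity-selected cell list B's row uses.
theorem pv_row_eq (i n : Int) :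
    (PySem.List.pyRange 0 n 1).foldl (fun row j =>
      if PySem.Int.mod (i + j) 2 = 0 then row ++ ["W"] else row ++ ["S"]) []
    = (PySem.List.pyRange 0 n 1).map
        (fun j => if PySem.Int.mod i 2 = 0 then (if PySem.Int.mod j 2 = 0 then "W" else "S")
                  else (if PySem.Int.mod j 2 = 0 then "S" else "W")) := by
  have hf : (fun (row : List String) (j : Int) =>
        if PySem.Int.mod (i + j) 2 = 0 then row ++ ["W"] else row ++ ["S"])
      = (fun (row : List String) (j : Int) =>
        row ++ [if PySem.Int.mod i 2 = 0 then (if PySem.Int.mod j 2 = 0 then "W" else "S")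
                  else (if PySem.Int.mod j 2 = 0 then "S" else "W")]) := by
    funext row j
    have hi := Int.emod_two_eq i
    have hj := Int.emod_two_eq j
    simp only [PySem.Int.mod_eq_emod_of_pos (by norm_num : (0:Int) < 2)]
    have hij : (i + j) % 2 = (i % 2 + j % 2) % 2 := by omega
    rcases hi with hi | hi <;> rcases hj with hj | hj <;> simp [hij, hi, hj]
  calc (PySem.List.pyRange 0 n 1).foldl (fun row j =>
        if PySem.Int.mod (i + j) 2 = 0 then row ++ ["W"] else row ++ ["S"]) []
      = (PySem.List.pyRange 0 n 1).foldl (fun row j =>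
        row ++ [if PySem.Int.mod i 2 = 0 then (if PySem.Int.mod j 2 = 0 then "W" else "S")
                  else (if PySem.Int.mod j 2 = 0 then "S" else "W")]) [] := by rw [hf]
    _ = _ := by
        simpa using PySem.List.foldl_append_singleton_eq_map
          (l := PySem.List.pyRange 0 n 1)
          (f := fun j => if PySem.Int.mod i 2 = 0 then (if PySem.Int.mod j 2 = 0 then "W" else "S")
                  else (if PySem.Int.mod j 2 = 0 then "S" else "W")) (acc := [])

-- ===== VERDICT (by name: the statement is the Claim_ definition above) =====
theorem funcChessBoard_spec : Claim_equal_funcChessBoard := by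
  intro n _
  unfold Spec_funcChessBoard funcChessBoard funcChessBoard_alt
  simp only [pv_row_eq]
  rw [PySem.List.foldl_append_singleton_eq_map]
  simp only [List.nil_append]
  congr 1
  apply List.map_congr_left
  intro i _
  by_cases hi : (2:Int) ∣ i <;> simp [hi]
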